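-- pv_equiv track=rewrite | github.com/antos07/AoC-2024 | 9/task1.py | compact_disk
-- ===== SOURCE A (Python) =====
-- def compact_disk(disk):
--     free_positions = (i for i, value in enumerate(disk) if value is None)
--     occupied_positions = [i for i, value in enumerate(disk) if value is not None]
--
--     disk = list(disk)
--     for free_pos, occupied_pos in zip(free_positions, reversed(occupied_positions)):
--         if free_pos > occupied_pos:
--             # it's impossible to compact any further
--             break
--
--         disk[free_pos], disk[occupied_pos] = disk[occupied_pos], disk[free_pos]
--     return disk
-- ===== SOURCE B (Python) =====
-- def compact_disk(disk):
--     vals = list(disk)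
--     m = sum(1 for v in vals if v is not None)
--     stack = [v for v in vals[m:] if v is not None]
--     out = []
--     for v in vals[:m]:
--         out.append(v if v is not None else stack.pop())
--     out.extend([None] * (len(vals) - m))
--     return out
-- ===== Notes on version B (the rewrite author's own statement) =====
-- stated objective: alternative
-- what changed: Instead of building free/occupied index lists, zipping them and swapping entries until the pointers cross, B counts the occupied slots m, then builds the result directly: the first m slots are the original prefix with each None replaced by popping from the stack of values found past position m, followed by all-None padding.
import Mathlib
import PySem

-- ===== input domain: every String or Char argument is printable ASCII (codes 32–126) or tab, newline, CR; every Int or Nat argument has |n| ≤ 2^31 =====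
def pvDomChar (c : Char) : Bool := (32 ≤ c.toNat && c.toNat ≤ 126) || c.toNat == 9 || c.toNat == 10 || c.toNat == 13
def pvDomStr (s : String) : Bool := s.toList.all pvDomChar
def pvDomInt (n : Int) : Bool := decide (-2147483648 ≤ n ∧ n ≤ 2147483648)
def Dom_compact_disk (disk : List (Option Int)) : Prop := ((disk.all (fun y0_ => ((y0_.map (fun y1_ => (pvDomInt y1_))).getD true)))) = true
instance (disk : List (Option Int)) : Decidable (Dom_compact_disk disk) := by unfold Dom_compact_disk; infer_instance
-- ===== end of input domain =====

-- B replaces A's index-list/zip/swap loop by a direct construction: count the occupied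
-- slots m, fill the Nones of the first m slots from the values found past m (taken from
-- the back), and pad with Nones; an 'alternative' of the same O(n) cost, not claimed faster.

-- ===== PORT A =====
-- free_positions = (i for i, value in enumerate(disk) if value is None)
def pvFree (disk : List (Option Int)) : List Int :=
  ((PySem.List.enumerate disk).filter (fun p => p.2.isNone)).map Prod.fst
-- occupied_positions = [i for i, value in enumerate(disk) if value is not None]
def pvOcc (disk : List (Option Int)) : List Int :=
  ((PySem.List.enumerate disk).filter (fun p => p.2.isSome)).map Prod.fst
-- the for-loop over zip(free_positions, reversed(occupied_positions)) with its break;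
-- the simultaneous swap reads both old entries, then writes (indices come from enumerate)
def pvSwapLoop : List (Int × Int) → List (Option Int) → List (Option Int)
  | [], d => d
  | (f, o) :: ps, d =>
    if f > o then d
    else pvSwapLoop ps
      (PySem.List.pySetD (PySem.List.pySetD d f (PySem.List.pyGetD d o none)) o
        (PySem.List.pyGetD d f none))

def compact_disk (disk : List (Option Int)) : List (Option Int) :=
  pvSwapLoop ((pvFree disk).zip (pvOcc disk).reverse) disk

-- ===== PORT B =====
-- the for-loop over vals[:m]: append the value, or pop the next filler from the back of
-- `stack`; popping from the back of `stack` = consuming `stack.reverse` from the front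
def pvFill : List (Option Int) → List (Option Int) → List (Option Int)
  | [], _ => []
  | some v :: rest, st => some v :: pvFill rest st
  | none :: rest, st => st.headD none :: pvFill rest st.tail

def compact_disk_alt (disk : List (Option Int)) : List (Option Int) :=
  let m := disk.countP (fun v => v.isSome)
  let stack := (disk.drop m).filter (fun v => v.isSome)
  pvFill (disk.take m) stack.reverse ++ List.replicate (disk.length - m) none

-- ===== PRECONDITION & SPEC =====
def Spec_compact_disk (disk : List (Option Int)) (out : List (Option Int)) : Prop := out = compact_disk_alt disk
instance (disk : List (Option Int)) (out : List (Option Int)) : Decidable (Spec_compact_disk disk out) := by unfold Spec_compact_disk; infer_instance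

-- ===== CLAIM (what is proved, stated in full; the proofs are below) =====
def Claim_equal_compact_disk : Prop := ∀ (disk : List (Option Int)), Dom_compact_disk disk → Spec_compact_disk disk (compact_disk disk)

-- ===== LEMMAS AND PROOFS =====

-- Nat-index mirrors of A's data (proof-side only)
def freeN : List (Option Int) → List Nat
  | [] => []
  | x :: xs => if x.isSome then (freeN xs).map (· + 1) else 0 :: (freeN xs).map (· + 1)

def occN : List (Option Int) → List Nat
  | [] => []
  | x :: xs => if x.isSome then 0 :: (occN xs).map (· + 1) else (occN xs).map (· + 1)

def swapLoopN : List (Nat × Nat) → List (Option Int) → List (Option Int)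
  | [], d => d
  | (f, o) :: ps, d =>
    if o < f then d
    else swapLoopN ps ((d.set f (d.getD o none)).set o (d.getD f none))

theorem enumerate_succ_shift (xs : List (Option Int)) : ∀ s : Int,
    PySem.List.enumerate xs (s + 1) = (PySem.List.enumerate xs s).map (fun p => (p.1 + 1, p.2)) := by
  induction xs with
  | nil => intro s; simp [PySem.List.enumerate_nil]
  | cons x xs ih =>
    intro s
    rw [PySem.List.enumerate_cons, PySem.List.enumerate_cons, ih (s + 1)]
    simp


theorem shift_filter_aux (q : Option Int → Bool) (l : List (Int × Option Int)) :
    ((l.map (fun p => (p.1 + 1, p.2))).filter (fun p => q p.2)).map Prod.fst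
      = ((l.filter (fun p => q p.2)).map Prod.fst).map (· + 1) := by
  induction l with
  | nil => rfl
  | cons a l ih =>
    obtain ⟨i, v⟩ := a
    by_cases h : q v <;> simp [h, ih]


theorem cast_shift_aux (f : List Nat) :
    ((f.map (fun n : Nat => (n : Int))).map (fun i : Int => i + 1))
      = (f.map (fun n : Nat => n + 1)).map (fun n : Nat => (n : Int)) := by
  simp only [List.map_map]
  refine List.map_congr_left ?_
  intro a _
  simp


theorem pvFree_eq (xs : List (Option Int)) : pvFree xs = (freeN xs).map (fun n : Nat => (n : Int)) := by
  induction xs with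
  | nil => simp [pvFree, freeN, PySem.List.enumerate_nil]
  | cons x xs ih =>
    have h1 : PySem.List.enumerate (x :: xs) 0
        = (0, x) :: (PySem.List.enumerate xs 0).map (fun p => (p.1 + 1, p.2)) := by
      rw [PySem.List.enumerate_cons]
      norm_num
      exact enumerate_succ_shift xs 0
    have h2 := shift_filter_aux (fun v => v.isNone) (PySem.List.enumerate xs 0)
    unfold pvFree at *
    rw [h1]
    cases x with
    | none =>
      simp only [List.filter_cons, Option.isNone_none, if_true, List.map_cons]
      rw [h2, ih, freeN]
      simp only [Option.isSome_none, Bool.false_eq_true, if_false, List.map_cons,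
        Nat.cast_zero, cast_shift_aux]
    | some v =>
      simp only [List.filter_cons, Option.isNone_some, Bool.false_eq_true, if_false]
      rw [h2, ih, freeN]
      simp only [Option.isSome_some, if_true, cast_shift_aux]


theorem pvOcc_eq (xs : List (Option Int)) : pvOcc xs = (occN xs).map (fun n : Nat => (n : Int)) := by
  induction xs with
  | nil => simp [pvOcc, occN, PySem.List.enumerate_nil]
  | cons x xs ih =>
    have h1 : PySem.List.enumerate (x :: xs) 0
        = (0, x) :: (PySem.List.enumerate xs 0).map (fun p => (p.1 + 1, p.2)) := by
      rw [PySem.List.enumerate_cons]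
      norm_num
      exact enumerate_succ_shift xs 0
    have h2 := shift_filter_aux (fun v => v.isSome) (PySem.List.enumerate xs 0)
    unfold pvOcc at *
    rw [h1]
    cases x with
    | some v =>
      simp only [List.filter_cons, Option.isSome_some, if_true, List.map_cons]
      rw [h2, ih, occN]
      simp only [Option.isSome_some, if_true, List.map_cons, Nat.cast_zero, cast_shift_aux]
    | none =>
      simp only [List.filter_cons, Option.isSome_none, Bool.false_eq_true, if_false]
      rw [h2, ih, occN]
      simp only [Option.isSome_none, Bool.false_eq_true, if_false, cast_shift_aux]


theorem swapLoop_eq_N : ∀ (ps : List (Nat × Nat)) (d : List (Option Int)),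
    pvSwapLoop (ps.map (fun p => ((p.1 : Int), (p.2 : Int)))) d = swapLoopN ps d := by
  intro ps
  induction ps with
  | nil => intro d; rfl
  | cons p ps ih =>
    intro d
    obtain ⟨f, o⟩ := p
    simp only [List.map_cons, pvSwapLoop, swapLoopN, gt_iff_lt, Nat.cast_lt]
    split
    · rfl
    · rw [PySem.List.pyGetD_natCast, PySem.List.pyGetD_natCast,
        PySem.List.pySetD_natCast, PySem.List.pySetD_natCast]
      exact ih _


theorem compact_eq_N (disk : List (Option Int)) :
    compact_disk disk = swapLoopN ((freeN disk).zip (occN disk).reverse) disk := by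
  unfold compact_disk
  rw [pvFree_eq, pvOcc_eq, ← List.map_reverse, List.zip_map]
  rw [← swapLoop_eq_N]
  congr 1

theorem filter_map_succ (p q : Nat → Bool) (h : ∀ n, p (n + 1) = q n) (l : List Nat) :
    (l.map (· + 1)).filter p = (l.filter q).map (· + 1) := by
  rw [List.filter_map]
  congr 1
  refine List.filter_congr ?_
  intro a _
  exact h a


theorem filter_map_succ_le (j : Nat) (l : List Nat) :
    (l.map (· + 1)).filter (fun i => decide (i ≤ j)) = (l.filter (fun i => decide (i < j))).map (· + 1) :=
  filter_map_succ _ _ (fun n => by simp) l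


theorem filter_map_succ_ne' (j : Nat) (l : List Nat) :
    (l.map (· + 1)).filter (fun i => !decide (i = j + 1)) = (l.filter (fun i => !decide (i = j))).map (· + 1) :=
  filter_map_succ _ _ (fun n => by simp) l


theorem filter_map_succ_gt (j : Nat) (l : List Nat) :
    (l.map (· + 1)).filter (fun i => j + 1 < i) = (l.filter (fun i => j < i)).map (· + 1) :=
  filter_map_succ _ _ (fun n => by simp) l






-- membership / order facts





-- loop-shape lemmas



-- structural lemmas about occN/freeN under set



-- A-side recurrences
theorem occN_set_none : ∀ (xs : List (Option Int)) (j : Nat),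
    occN (xs.set j none) = (occN xs).filter (fun i => i ≠ j) := by
  intro xs
  induction xs with
  | nil => intro j; rfl
  | cons x xs ih =>
    intro j
    have hself : ∀ l : List Nat, (l.map (· + 1)).filter (fun i => !decide (i = 0)) = l.map (· + 1) := by
      intro l
      refine List.filter_eq_self.mpr ?_
      intro a ha
      simp only [List.mem_map] at ha
      obtain ⟨b, _, rfl⟩ := ha
      simp
    cases j with
    | zero =>
      cases x <;> simp [occN, hself]
    | succ n =>
      cases x <;>
      · simp [occN, ih n]
        exact (filter_map_succ_ne' n _).symm


theorem freeN_set_none : ∀ (xs : List (Option Int)) (j : Nat),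
    j < xs.length → (xs.getD j none).isSome →
    freeN (xs.set j none)
      = (freeN xs).filter (fun i => i < j) ++ j :: (freeN xs).filter (fun i => j < i) := by
  intro xs
  induction xs with
  | nil => intro j h; simp at h
  | cons x xs ih =>
    intro j hj hs
    cases j with
    | zero =>
      cases x with
      | none => simp at hs
      | some v =>
        simp only [List.set_cons_zero, freeN, Option.isSome_some, if_true,
          Option.isSome_none, Bool.false_eq_true, if_false]
        have h1 : ((freeN xs).map (· + 1)).filter (fun i => i < 0) = [] := by
          simp
        have h2 : ((freeN xs).map (· + 1)).filter (fun i => 0 < i) = (freeN xs).map (· + 1) := by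
          refine List.filter_eq_self.mpr ?_
          intro a ha
          simp only [List.mem_map] at ha
          obtain ⟨b, _, rfl⟩ := ha
          simp
        rw [h1, h2]
        rfl
    | succ n =>
      have hj' : n < xs.length := by simpa using hj
      have hs' : (xs.getD n none).isSome := by simpa using hs
      have IH := ih n hj' hs'
      cases x with
      | some v =>
        simp only [List.set_cons_succ, freeN, Option.isSome_some, if_true]
        rw [IH]
        simp [filter_map_succ_gt n]
        exact (filter_map_succ_le n _).symm
      | none =>
        simp only [List.set_cons_succ, freeN, Option.isSome_none, Bool.false_eq_true, if_false]
        rw [IH]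
        simp only [List.filter_cons]
        norm_num
        simp [filter_map_succ_gt n]
        exact (filter_map_succ_le n _).symm


theorem sorted_split (j : Nat) : ∀ (l : List Nat), l.Pairwise (· < ·) →
    l = l.filter (fun i => i < j) ++ l.filter (fun i => j ≤ i) := by
  intro l
  induction l with
  | nil => intro; rfl
  | cons a l ih =>
    intro hp
    rw [List.pairwise_cons] at hp
    by_cases h : a < j
    · have hnotle : ¬ j ≤ a := by omega
      simp only [List.filter_cons, h, decide_true, if_true, hnotle, decide_false,
        Bool.false_eq_true, if_false, List.cons_append]
      exact congrArg (a :: ·) (ih hp.2)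
    · have hle : j ≤ a := by omega
      have hnil : l.filter (fun i => decide (i < j)) = [] := by
        rw [List.filter_eq_nil_iff]
        intro b hb
        have := hp.1 b hb
        simp only [decide_eq_true_eq]
        omega
      have hall : l.filter (fun i => decide (j ≤ i)) = l := by
        refine List.filter_eq_self.mpr ?_
        intro b hb
        have := hp.1 b hb
        simp only [decide_eq_true_eq]
        omega
      simp only [List.filter_cons, h, decide_false, Bool.false_eq_true, if_false,
        hle, decide_true, if_true]
      rw [hnil, hall]
      rfl

theorem mem_occN : ∀ (xs : List (Option Int)) (i : Nat),
    i ∈ occN xs ↔ i < xs.length ∧ (xs.getD i none).isSome := by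
  intro xs
  induction xs with
  | nil => intro i; simp [occN]
  | cons x xs ih =>
    intro i
    cases i with
    | zero => cases x <;> simp [occN, ih]
    | succ n => cases x <;> simp [occN, ih]


theorem pairwise_freeN : ∀ (xs : List (Option Int)), (freeN xs).Pairwise (· < ·) := by
  intro xs
  induction xs with
  | nil => simp [freeN]
  | cons x xs ih =>
    have hm : ((freeN xs).map (· + 1)).Pairwise (· < ·) := by
      rw [List.pairwise_map]
      exact ih.imp (by omega)
    cases x with
    | some v => simpa [freeN] using hm
    | none =>
      simp only [freeN, Option.isSome_none, Bool.false_eq_true, if_false]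
      refine List.Pairwise.cons ?_ hm
      intro y hy
      simp only [List.mem_map] at hy
      omega


theorem pairwise_occN : ∀ (xs : List (Option Int)), (occN xs).Pairwise (· < ·) := by
  intro xs
  induction xs with
  | nil => simp [occN]
  | cons x xs ih =>
    have hm : ((occN xs).map (· + 1)).Pairwise (· < ·) := by
      rw [List.pairwise_map]
      exact ih.imp (by omega)
    cases x with
    | none => simpa [occN] using hm
    | some v =>
      simp only [occN, Option.isSome_some, if_true]
      refine List.Pairwise.cons ?_ hm
      intro y hy
      simp only [List.mem_map] at hy
      omega


theorem length_occN : ∀ (xs : List (Option Int)), (occN xs).length = xs.countP (fun v => v.isSome) := by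
  intro xs
  induction xs with
  | nil => simp [occN]
  | cons x xs ih => cases x <;> simp [occN, ih]


theorem swapLoopN_shift : ∀ (ps : List (Nat × Nat)) (x : Option Int) (d : List (Option Int)),
    swapLoopN (ps.map (fun p => (p.1 + 1, p.2 + 1))) (x :: d) = x :: swapLoopN ps d := by
  intro ps
  induction ps with
  | nil => intro x d; simp [swapLoopN]
  | cons p ps ih =>
    intro x d
    obtain ⟨f, o⟩ := p
    simp only [List.map_cons, swapLoopN, Nat.add_lt_add_iff_right]
    split
    · rfl
    · simpa using ih x _


theorem swapLoopN_stop_left : ∀ (F R L : List Nat) (d : List (Option Int)),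
    (∀ r ∈ R, ∀ o ∈ L, o < r) →
    swapLoopN ((F ++ R).zip L) d = swapLoopN (F.zip L) d := by
  intro F
  induction F with
  | nil =>
    intro R L d h
    cases R with
    | nil => rfl
    | cons r R' =>
      cases L with
      | nil => rfl
      | cons o L' =>
        simp only [List.nil_append, List.zip_cons_cons, swapLoopN, List.zip_nil_left]
        rw [if_pos (h r (by simp) o (by simp))]
  | cons f F' ih =>
    intro R L d h
    cases L with
    | nil => rfl
    | cons o L' =>
      simp only [List.cons_append, List.zip_cons_cons, swapLoopN]
      split
      · rfl
      · exact ih R L' _ (fun r hr o' ho' => h r hr o' (by simp [ho']))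


theorem swapLoopN_stop_right : ∀ (X Y B : List Nat) (d : List (Option Int)),
    (∀ f ∈ X, ∀ b ∈ B, b < f) →
    swapLoopN (X.zip (Y ++ B)) d = swapLoopN (X.zip Y) d := by
  intro X
  induction X with
  | nil => intro Y B d h; rfl
  | cons x X' ih =>
    intro Y B d h
    cases Y with
    | nil =>
      cases B with
      | nil => rfl
      | cons b B' =>
        simp only [List.nil_append, List.zip_cons_cons, swapLoopN, List.zip_nil_right]
        rw [if_pos (h x (by simp) b (by simp))]
    | cons y Y' =>
      simp only [List.cons_append, List.zip_cons_cons, swapLoopN]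
      split
      · rfl
      · exact ih Y' B _ (fun f hf b hb => h f (by simp [hf]) b hb)

theorem prodmap_succ :
    (Prod.map (· + 1) (· + 1) : Nat × Nat → Nat × Nat) = fun p => (p.1 + 1, p.2 + 1) := by
  funext p
  cases p
  rfl

theorem set_append_len {α : Type} (P : List α) (b y : α) (S : List α) :
    (P ++ b :: S).set P.length y = P ++ y :: S := by
  induction P with
  | nil => rfl
  | cons a P ih => simp [ih]

theorem A_cons_some (v : Int) (r : List (Option Int)) :
    swapLoopN ((freeN (some v :: r)).zip (occN (some v :: r)).reverse) (some v :: r)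
      = some v :: swapLoopN ((freeN r).zip (occN r).reverse) r := by
  have hf : freeN (some v :: r) = (freeN r).map (· + 1) := by simp [freeN]
  have ho : occN (some v :: r) = 0 :: (occN r).map (· + 1) := by simp [occN]
  rw [hf, ho, List.reverse_cons]
  rw [swapLoopN_stop_right ((freeN r).map (· + 1)) (((occN r).map (· + 1)).reverse) [0] _ ?hb]
  case hb =>
    intro f hf' b hb
    simp only [List.mem_singleton] at hb
    subst hb
    simp only [List.mem_map] at hf'
    obtain ⟨a, _, rfl⟩ := hf'
    omega
  rw [← List.map_reverse, List.zip_map, prodmap_succ, swapLoopN_shift]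

theorem A_cons_none_nil (r : List (Option Int)) (h : occN r = []) :
    swapLoopN ((freeN (none :: r)).zip (occN (none :: r)).reverse) (none :: r) = none :: r := by
  have ho : occN (none :: r) = (occN r).map (· + 1) := by simp [occN]
  rw [ho, h]
  rfl

theorem alt_eq (d : List (Option Int)) :
    compact_disk_alt d
      = pvFill (d.take (d.countP (fun v => v.isSome)))
          (((d.drop (d.countP (fun v => v.isSome))).filter (fun v => v.isSome)).reverse)
        ++ List.replicate (d.length - d.countP (fun v => v.isSome)) none := rfl

theorem A_cons_none (r : List (Option Int)) (O : List Nat) (j : Nat) (h : occN r = O ++ [j]) :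
    swapLoopN ((freeN (none :: r)).zip (occN (none :: r)).reverse) (none :: r)
      = r.getD j none ::
        swapLoopN ((freeN (r.set j none)).zip (occN (r.set j none)).reverse) (r.set j none) := by
  have hjmem : j ∈ occN r := by rw [h]; simp
  obtain ⟨hjlen, hjsome⟩ := (mem_occN r j).mp hjmem
  have hOlt : ∀ o ∈ O, o < j := by
    have hp := pairwise_occN r
    rw [h] at hp
    have hsplit := List.pairwise_append.mp hp
    intro o ho
    exact hsplit.2.2 o ho j (by simp)
  have hf : freeN (none :: r) = 0 :: (freeN r).map (· + 1) := by simp [freeN]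
  have ho : occN (none :: r) = (O.map (· + 1)) ++ [j + 1] := by simp [occN, h]
  rw [hf, ho, List.reverse_append, List.reverse_singleton, List.singleton_append,
    List.zip_cons_cons]
  have hstep : swapLoopN ((0, j + 1) :: ((freeN r).map (· + 1)).zip (O.map (· + 1)).reverse)
        (none :: r)
      = swapLoopN (((freeN r).map (· + 1)).zip (O.map (· + 1)).reverse)
        (r.getD j none :: r.set j none) := by
    simp [swapLoopN, List.set_cons_succ, List.set_cons_zero]
  rw [hstep, ← List.map_reverse, List.zip_map, prodmap_succ, swapLoopN_shift]
  congr 1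
  have hocc' : occN (r.set j none) = O := by
    rw [occN_set_none, h, List.filter_append]
    have h1 : O.filter (fun i => i ≠ j) = O :=
      List.filter_eq_self.mpr (fun a ha => by
        have := hOlt a ha
        simp only [ne_eq, decide_not, Bool.not_eq_eq_eq_not, Bool.not_true,
          decide_eq_false_iff_not]
        omega)
    have h2 : [j].filter (fun i => i ≠ j) = ([] : List Nat) := by simp
    rw [h1, h2, List.append_nil]
  have hfree' := freeN_set_none r j hjlen hjsome
  have hLlt : ∀ o ∈ O.reverse, o < j := fun o ho => hOlt o (List.mem_reverse.mp ho)
  have e1 : swapLoopN ((freeN (r.set j none)).zip (occN (r.set j none)).reverse) (r.set j none)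
      = swapLoopN (((freeN r).filter (fun i => i < j)).zip O.reverse) (r.set j none) := by
    rw [hocc', hfree']
    refine swapLoopN_stop_left _ _ _ _ ?_
    intro x hx o hoL
    rcases List.mem_cons.mp hx with rfl | hx'
    · exact hLlt _ hoL
    · have hjx : j < x := by
        have := (List.mem_filter.mp hx').2
        simpa using this
      exact lt_trans (hLlt o hoL) hjx
  have e2 : swapLoopN ((freeN r).zip O.reverse) (r.set j none)
      = swapLoopN (((freeN r).filter (fun i => i < j)).zip O.reverse) (r.set j none) := by
    conv_lhs => rw [sorted_split j (freeN r) (pairwise_freeN r)]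
    refine swapLoopN_stop_left _ _ _ _ ?_
    intro x hx o hoL
    have hxle : j ≤ x := by
      have := (List.mem_filter.mp hx).2
      simpa using this
    exact lt_of_lt_of_le (hLlt o hoL) hxle
  exact e2.trans e1.symm

theorem B_cons_some (v : Int) (r : List (Option Int)) :
    compact_disk_alt (some v :: r) = some v :: compact_disk_alt r := by
  unfold compact_disk_alt
  simp only [List.countP_cons, Option.isSome_some, if_true, List.take_succ_cons,
    List.drop_succ_cons, List.length_cons, Nat.succ_sub_succ, pvFill, List.cons_append]

theorem B_cons_none_nil (r : List (Option Int)) (h : r.countP (fun v => v.isSome) = 0) :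
    compact_disk_alt (none :: r) = none :: r := by
  have hall : ∀ x ∈ r, x = none := by
    intro x hx
    have := List.countP_eq_zero.mp h x hx
    cases x with
    | none => rfl
    | some v => simp at this
  have hrep : r = List.replicate r.length none := List.eq_replicate_of_mem hall
  unfold compact_disk_alt
  simp only [List.countP_cons, Option.isSome_none, Bool.false_eq_true, if_false, h,
    Nat.add_zero, List.take_zero, List.length_cons, Nat.sub_zero, pvFill, List.nil_append]
  conv_rhs => rw [hrep]
  simp [List.replicate_succ]

theorem B_cons_none (r : List (Option Int)) (O : List Nat) (j : Nat) (h : occN r = O ++ [j]) :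
    compact_disk_alt (none :: r) = r.getD j none :: compact_disk_alt (r.set j none) := by
  have hjmem : j ∈ occN r := by rw [h]; simp
  obtain ⟨hjlen, hjsome⟩ := (mem_occN r j).mp hjmem
  obtain ⟨w, hw⟩ := Option.isSome_iff_exists.mp hjsome
  have hOlt : ∀ o ∈ O, o < j := by
    have hp := pairwise_occN r
    rw [h] at hp
    have hsplit := List.pairwise_append.mp hp
    intro o ho
    exact hsplit.2.2 o ho j (by simp)
  have hafter : ∀ i, j < i → i < r.length → r.getD i none = none := by
    intro i hji hilen
    by_cases his : (r.getD i none).isSome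
    · have hi : i ∈ occN r := (mem_occN r i).mpr ⟨hilen, his⟩
      rw [h] at hi
      rcases List.mem_append.mp hi with hO | hj'
      · exact absurd (hOlt i hO) (by omega)
      · simp only [List.mem_singleton] at hj'
        omega
    · cases hgd : r.getD i none with
      | none => rfl
      | some u => rw [hgd] at his; simp at his
  have hPlen : (r.take j).length = j := by
    simp [List.length_take]
    omega
  have hrdecomp : r = r.take j ++ some w :: r.drop (j + 1) := by
    conv_lhs => rw [← List.take_append_drop j r]
    congr 1
    rw [List.drop_eq_getElem_cons hjlen]
    congr 1
    rw [← List.getD_eq_getElem r none hjlen]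
    exact hw
  have hSnone : ∀ x ∈ r.drop (j + 1), x = none := by
    intro x hx
    obtain ⟨i, hi, hxi⟩ := List.mem_iff_getElem.mp hx
    rw [List.getElem_drop] at hxi
    have hlen' : j + 1 + i < r.length := by
      have := hi
      simp [List.length_drop] at this
      omega
    rw [← hxi, ← List.getD_eq_getElem r none hlen']
    exact hafter (j + 1 + i) (by omega) hlen'
  have hSfilter : (r.drop (j + 1)).filter (fun v => v.isSome) = [] := by
    rw [List.filter_eq_nil_iff]
    intro a ha
    rw [hSnone a ha]
    simp
  have hScount : (r.drop (j + 1)).countP (fun v => v.isSome) = 0 := by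
    rw [List.countP_eq_zero]
    intro a ha
    rw [hSnone a ha]
    simp
  set P := r.take j with hP
  set S := r.drop (j + 1) with hS
  set mp := P.countP (fun v => v.isSome) with hmp
  have hmr : r.countP (fun v => v.isSome) = mp + 1 := by
    conv_lhs => rw [hrdecomp]
    simp only [List.countP_append, List.countP_cons, Option.isSome_some, if_true, hScount]
    omega
  have hmple : mp ≤ j := by
    have h1 := List.countP_le_length (l := P) (p := fun v => v.isSome)
    rw [← hmp] at h1
    omega
  have hset : r.set j none = P ++ none :: S := by
    conv_lhs => rw [hrdecomp, ← hPlen]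
    exact set_append_len P (some w) none S
  have hrlen : r.length = P.length + 1 + S.length := by
    conv_lhs => rw [hrdecomp]
    simp
    omega
  have htake : (none :: r).take (mp + 1) = none :: P.take mp := by
    rw [List.take_succ_cons]
    congr 1
    conv_lhs => rw [hrdecomp]
    rw [List.take_append_of_le_length (by omega)]
  have hdrop : (none :: r).drop (mp + 1) = P.drop mp ++ some w :: S := by
    rw [List.drop_succ_cons]
    conv_lhs => rw [hrdecomp]
    rw [List.drop_append_of_le_length (by omega)]
  have hstack : ((none :: r).drop (mp + 1)).filter (fun v => v.isSome)
      = (P.drop mp).filter (fun v => v.isSome) ++ [some w] := by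
    rw [hdrop, List.filter_append, List.filter_cons]
    simp [hSfilter]
  have hmd : (none :: r).countP (fun v => v.isSome) = mp + 1 := by
    simp [hmr]
  have hmr' : (P ++ none :: S).countP (fun v => v.isSome) = mp := by
    simp only [List.countP_append, List.countP_cons, Option.isSome_none, Bool.false_eq_true,
      if_false, hScount]
    omega
  have htake' : (P ++ none :: S).take mp = P.take mp :=
    List.take_append_of_le_length (by omega)
  have hdrop' : (P ++ none :: S).drop mp = P.drop mp ++ none :: S :=
    List.drop_append_of_le_length (by omega)
  have hfilter' : ((P ++ none :: S).drop mp).filter (fun v => v.isSome)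
      = (P.drop mp).filter (fun v => v.isSome) := by
    rw [hdrop', List.filter_append, List.filter_cons]
    simp [hSfilter]
  rw [hset, alt_eq (none :: r), alt_eq (P ++ none :: S)]
  rw [hmd, hmr', htake, hstack, htake', hfilter']
  rw [List.reverse_append, List.reverse_singleton, List.singleton_append]
  rw [hw]
  have hfill : pvFill (none :: P.take mp)
        (some w :: ((P.drop mp).filter (fun v => v.isSome)).reverse)
      = some w :: pvFill (P.take mp) ((P.drop mp).filter (fun v => v.isSome)).reverse := by
    simp [pvFill]
  rw [hfill, List.cons_append]
  have hmpP : mp ≤ P.length := hPlen ▸ hmple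
  have harith : (none :: r).length - (mp + 1) = (P ++ none :: S).length - mp := by
    clear_value P S mp
    simp only [List.length_cons, List.length_append]
    omega
  rw [harith]

theorem main_core : ∀ (n : Nat) (d : List (Option Int)), d.length ≤ n →
    swapLoopN ((freeN d).zip (occN d).reverse) d = compact_disk_alt d := by
  intro n
  induction n with
  | zero =>
    intro d hd
    have : d = [] := List.eq_nil_of_length_eq_zero (by omega)
    subst this
    rfl
  | succ n ih =>
    intro d hd
    cases d with
    | nil => rfl
    | cons x r =>
      have hrlen : r.length ≤ n := by simpa using hd
      cases x with
      | some v =>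
        rw [A_cons_some, B_cons_some, ih r hrlen]
      | none =>
        rcases List.eq_nil_or_concat (occN r) with hnil | ⟨O, j, hOj⟩
        · have hcnt : r.countP (fun v => v.isSome) = 0 := by
            rw [← length_occN, hnil]
            rfl
          rw [A_cons_none_nil r hnil, B_cons_none_nil r hcnt]
        · have hOj' : occN r = O ++ [j] := by rw [hOj]; simp [List.concat_eq_append]
          rw [A_cons_none r O j hOj', B_cons_none r O j hOj']
          congr 1
          exact ih (r.set j none) (by simpa using hrlen)

-- ===== VERDICT (by name: the statement is the Claim_ definition above) =====
theorem compact_disk_spec : Claim_equal_compact_disk := by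
  intro disk _
  unfold Spec_compact_disk
  rw [compact_eq_N]
  exact main_core disk.length disk (le_refl _)
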